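-- pv_equiv track=rewrite | github.com/ArmandoCN3/Automatas | Practica2.py | AutoNumR
-- ===== SOURCE A (Python) =====
-- def AutoNumR(w):
--     state = "q0"
--     for i in w:
--         if state == "q0":
--             if i.isdigit() or i=="-" or i=="+":
--                 state = "q1"
--             else:
--                 state = "M"
--         elif state == "q1":
--             if i.isdigit():
--                 state = "q1"
--             elif i == ".":
--                 state = "q2"
--             elif i == "E" or i =="e":
--                 state = "q4"
--             else:
--                 state = "M"
--         elif state == "q2":
--             if i.isdigit():
--                 state = "q3"
--             else:
--                 state = "M"
--         elif state == "q3":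
--             if i.isdigit():
--                 state = "q3"
--             elif i == "E" or i=="e":
--                 state = "q4"
--             else:
--                 state = "M"
--         elif state == "q4":
--             if i.isdigit():
--                 state="q3"
--             elif i=="-" or i=="+":
--                 state="q5"
--             else:
--                 state="M"
--         elif state == "q5":
--             if i.isdigit():
--                 state="q3"
--             else:
--                 state="M"
--     if state == "q1" or state == "q3":
--         return True
--     else:
--         return False
-- ===== SOURCE B (Python) =====
-- def AutoNumR(w):
--     n = len(w)
--
--     def digit_run(k):
--         # advance past a (possibly empty) run of digits
--         while k < n and w[k].isdigit():
--             k += 1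
--         return k
--
--     # mantissa: sign or digit, then digits, then an optional ".digits+" fraction
--     if n == 0 or not (w[0].isdigit() or w[0] in "+-"):
--         return False
--     k = digit_run(1)
--     if k < n and w[k] == ".":
--         j = digit_run(k + 1)
--         if j == k + 1:
--             return False
--         k = j
--     # zero or more exponent parts: [eE] sign? digits+
--     while k < n:
--         if w[k] not in "eE":
--             return False
--         k += 1
--         if k < n and w[k] in "+-":
--             k += 1
--         j = digit_run(k)
--         if j == k:
--             return False
--         k = j
--     return True
-- ===== Notes on version B (the rewrite author's own statement) =====
-- stated objective: alternative
-- what changed: Replaced the six-state DFA loop with an index-based recursive-descent scanner organized by grammar phases: a digit_run helper, a mantissa stage with an optional fraction, and a while loop consuming exponent parts (e or E, optional sign, digits).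
import Mathlib
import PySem

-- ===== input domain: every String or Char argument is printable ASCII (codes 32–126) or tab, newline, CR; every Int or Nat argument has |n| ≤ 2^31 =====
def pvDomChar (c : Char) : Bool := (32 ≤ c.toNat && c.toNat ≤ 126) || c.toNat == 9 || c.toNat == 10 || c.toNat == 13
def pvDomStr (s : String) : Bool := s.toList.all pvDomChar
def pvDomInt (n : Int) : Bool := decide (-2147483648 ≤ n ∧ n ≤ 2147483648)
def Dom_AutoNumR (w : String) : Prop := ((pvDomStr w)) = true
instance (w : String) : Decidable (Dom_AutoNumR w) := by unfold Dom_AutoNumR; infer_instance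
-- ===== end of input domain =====

-- B replaces A's six-state DFA loop with an index-based recursive-descent scanner structured by
-- grammar phases (mantissa, optional fraction, a loop of '[eE] sign? digits+' exponent parts).

-- ===== PORT A =====
-- the body of A's for-loop: one transition of the hand-written branch cascade
def AutoNumR_step (state : String) (i : Char) : String :=
  if state == "q0" then
    if PySem.Chars.isdigit i || i == '-' || i == '+' then "q1" else "M"
  else if state == "q1" then
    if PySem.Chars.isdigit i then "q1"
    else if i == '.' then "q2"
    else if i == 'E' || i == 'e' then "q4"
    else "M"
  else if state == "q2" then
    if PySem.Chars.isdigit i then "q3" else "M"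
  else if state == "q3" then
    if PySem.Chars.isdigit i then "q3"
    else if i == 'E' || i == 'e' then "q4"
    else "M"
  else if state == "q4" then
    if PySem.Chars.isdigit i then "q3"
    else if i == '-' || i == '+' then "q5"
    else "M"
  else if state == "q5" then
    if PySem.Chars.isdigit i then "q3" else "M"
  else state

def AutoNumR (w : String) : Bool :=
  let state := w.toList.foldl AutoNumR_step "q0"
  if state == "q1" || state == "q3" then true else false

-- ===== PORT B =====
-- Source B's digit_run: 'while k < n and w[k].isdigit(): k += 1; return k'
def pvDigitRun (l : List Char) (k : Nat) : Nat :=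
  if h : k < l.length then
    if PySem.Chars.isdigit l[k] then pvDigitRun l (k + 1) else k
  else k
termination_by l.length - k

-- Source B's "if k < n and w[k] in '+-': k += 1" inside the while loop
def pvSkipSign (l : List Char) (k : Nat) : Nat :=
  if h : k < l.length then
    if l[k] = '+' ∨ l[k] = '-' then k + 1 else k
  else k

-- k ≤ pvDigitRun l k / pvSkipSign l k  (needed for the termination of pvExpLoop)
theorem pvDigitRun_ge (l : List Char) (k : Nat) : k ≤ pvDigitRun l k := by
  fun_induction pvDigitRun l k <;> omega

theorem pvSkipSign_ge (l : List Char) (k : Nat) : k ≤ pvSkipSign l k := by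
  unfold pvSkipSign; split <;> [skip; omega]; split <;> omega

-- Source B's trailing 'while k < n: …' loop over exponent parts
def pvExpLoop (l : List Char) (k : Nat) : Bool :=
  if hk : k < l.length then
    if ¬ (l[k] = 'e' ∨ l[k] = 'E') then false
    else
      let k2 := pvSkipSign l (k + 1)
      let j := pvDigitRun l k2
      if j = k2 then false else pvExpLoop l j
  else true
termination_by l.length - k
decreasing_by
  have h1 := pvSkipSign_ge l (k + 1)
  have h2 := pvDigitRun_ge l (pvSkipSign l (k + 1))
  omega

def AutoNumR_alt (w : String) : Bool :=
  let l := w.toList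
  if h0 : 0 < l.length then
    if ¬ (PySem.Chars.isdigit l[0] ∨ l[0] = '+' ∨ l[0] = '-') then false
    else
      let k := pvDigitRun l 1
      if hk : k < l.length then
        if l[k] = '.' then
          let j := pvDigitRun l (k + 1)
          if j = k + 1 then false else pvExpLoop l j
        else pvExpLoop l k
      else pvExpLoop l k
  else false

-- ===== PRECONDITION & SPEC =====
def Spec_AutoNumR (w : String) (out : Bool) : Prop := out = AutoNumR_alt w
instance (w : String) (out : Bool) : Decidable (Spec_AutoNumR w out) := by unfold Spec_AutoNumR; infer_instance

-- ===== CLAIM (what is proved, stated in full; the proofs are below) =====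
def Claim_equal_AutoNumR : Prop := ∀ (w : String), Dom_AutoNumR w → Spec_AutoNumR w (AutoNumR w)

-- ===== LEMMAS AND PROOFS =====

-- acceptance of A's automaton started in state s on the remaining input
def pvAccept (s : String) (l : List Char) : Bool :=
  l.foldl AutoNumR_step s == "q1" || l.foldl AutoNumR_step s == "q3"

theorem pvAccept_M (l : List Char) : pvAccept "M" l = false := by
  induction l with
  | nil => rfl
  | cons c t ih => simpa [pvAccept, AutoNumR_step] using ih

theorem pvDigitRun_le (l : List Char) (k : Nat) (h : k ≤ l.length) : pvDigitRun l k ≤ l.length := by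
  fun_induction pvDigitRun l k <;> omega

theorem pvDigitRun_stop (l : List Char) (k : Nat) :
    l.length ≤ pvDigitRun l k ∨ ∃ h : pvDigitRun l k < l.length,
      PySem.Chars.isdigit l[pvDigitRun l k] = false := by
  fun_induction pvDigitRun l k with
  | case1 k hk hd ih => exact ih
  | case2 k hk hd => exact Or.inr ⟨hk, by simpa using hd⟩
  | case3 k hk => exact Or.inl (by omega)

theorem pvDigitRun_succ_of_digit (l : List Char) (k : Nat) (hk : k < l.length)
    (hd : PySem.Chars.isdigit l[k]) : pvDigitRun l k = pvDigitRun l (k + 1) := by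
  rw [pvDigitRun]; simp [hk, hd]

-- the digit run keeps states q1 and q3 fixed
theorem pvAccept_run (s : String) (hs : s = "q1" ∨ s = "q3") (l : List Char) (k : Nat) :
    pvAccept s (l.drop k) = pvAccept s (l.drop (pvDigitRun l k)) := by
  fun_induction pvDigitRun l k with
  | case1 k hk hd ih =>
    have hstep : AutoNumR_step s l[k] = s := by
      rcases hs with rfl | rfl <;> simp [AutoNumR_step, hd]
    rw [List.drop_eq_getElem_cons hk]
    simp only [pvAccept, List.foldl_cons, hstep]
    exact ih
  | case2 k hk hd => rfl
  | case3 k hk => rfl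

-- evaluation lemmas for the B-side helpers
theorem pvDigitRun_of_ge (l : List Char) (k : Nat) (h : l.length ≤ k) : pvDigitRun l k = k := by
  rw [pvDigitRun, dif_neg (by omega)]

theorem pvDigitRun_of_not_digit (l : List Char) (k : Nat) (hk : k < l.length)
    (hd : PySem.Chars.isdigit l[k] = false) : pvDigitRun l k = k := by
  rw [pvDigitRun, dif_pos hk, if_neg (by simp [hd])]

theorem pvSkipSign_of_ge (l : List Char) (k : Nat) (h : l.length ≤ k) : pvSkipSign l k = k := by
  rw [pvSkipSign, dif_neg (by omega)]

theorem pvSkipSign_of_sign (l : List Char) (k : Nat) (hk : k < l.length)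
    (hs : l[k] = '+' ∨ l[k] = '-') : pvSkipSign l k = k + 1 := by
  rw [pvSkipSign, dif_pos hk, if_pos hs]

theorem pvSkipSign_of_not_sign (l : List Char) (k : Nat) (hk : k < l.length)
    (hs : ¬ (l[k] = '+' ∨ l[k] = '-')) : pvSkipSign l k = k := by
  rw [pvSkipSign, dif_pos hk, if_neg hs]

theorem pvExpLoop_of_ge (l : List Char) (k : Nat) (h : l.length ≤ k) : pvExpLoop l k = true := by
  rw [pvExpLoop, dif_neg (by omega)]

theorem pvExpLoop_of_not_e (l : List Char) (k : Nat) (hk : k < l.length)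
    (hne : ¬ (l[k] = 'e' ∨ l[k] = 'E')) : pvExpLoop l k = false := by
  rw [pvExpLoop, dif_pos hk, if_pos hne]

theorem pvExpLoop_of_e (l : List Char) (k : Nat) (hk : k < l.length)
    (he : l[k] = 'e' ∨ l[k] = 'E') :
    pvExpLoop l k =
      (if pvDigitRun l (pvSkipSign l (k + 1)) = pvSkipSign l (k + 1) then false
       else pvExpLoop l (pvDigitRun l (pvSkipSign l (k + 1)))) := by
  rw [pvExpLoop, dif_pos hk, if_neg (not_not_intro he)]

@[simp] theorem pvAccept_cons (s : String) (c : Char) (t : List Char) :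
    pvAccept s (c :: t) = pvAccept (AutoNumR_step s c) t := by
  simp [pvAccept]

theorem pvAccept_q2_nil : pvAccept "q2" [] = false := by decide
theorem pvAccept_q4_nil : pvAccept "q4" [] = false := by decide
theorem pvAccept_q5_nil : pvAccept "q5" [] = false := by decide

-- main loop lemma: at a stopped position, B's exponent loop computes A's acceptance from q3
theorem pvExpLoop_eq_accept_q3 (l : List Char) : ∀ m k, l.length - k = m → k ≤ l.length →
    (∀ h : k < l.length, PySem.Chars.isdigit l[k] = false) →
    pvExpLoop l k = pvAccept "q3" (l.drop k) := by
  intro m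
  induction m using Nat.strong_induction_on with
  | _ m ih =>
  intro k hm hk hstop
  by_cases hlt : k < l.length
  · have hd := hstop hlt
    by_cases he : l[k] = 'e' ∨ l[k] = 'E'
    · -- A moves q3 → q4
      have hstep : AutoNumR_step "q3" l[k] = "q4" := by
        rcases he with h | h <;> rw [h] <;> decide
      rw [List.drop_eq_getElem_cons hlt, pvAccept_cons, hstep, pvExpLoop_of_e l k hlt he]
      by_cases h1 : k + 1 < l.length
      · by_cases hs2 : l[k + 1] = '+' ∨ l[k + 1] = '-'
        · -- sign after the e: A moves q4 → q5
          have hk2 : pvSkipSign l (k + 1) = k + 2 := pvSkipSign_of_sign l (k + 1) h1 hs2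
          have hstep2 : AutoNumR_step "q4" l[k + 1] = "q5" := by
            rcases hs2 with h | h <;> rw [h] <;> decide
          rw [List.drop_eq_getElem_cons h1, pvAccept_cons, hstep2, hk2]
          by_cases h2 : k + 2 < l.length
          · by_cases hd2 : PySem.Chars.isdigit l[k + 2] = true
            · -- a digit: A moves q5 → q3 and runs the digits; B recurses at j
              have hstep3 : AutoNumR_step "q5" l[k + 2] = "q3" := by
                simp [AutoNumR_step, hd2]
              have hj : pvDigitRun l (k + 2) = pvDigitRun l (k + 3) :=
                pvDigitRun_succ_of_digit l (k + 2) h2 hd2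
              have hge : k + 3 ≤ pvDigitRun l (k + 3) := pvDigitRun_ge l (k + 3)
              have hle : pvDigitRun l (k + 3) ≤ l.length := pvDigitRun_le l (k + 3) (by omega)
              rw [if_neg (by omega), List.drop_eq_getElem_cons h2, pvAccept_cons, hstep3, hj,
                pvAccept_run "q3" (Or.inr rfl) l (k + 3)]
              refine ih (l.length - pvDigitRun l (k + 3)) (by omega) _ rfl hle ?_
              intro h
              rcases pvDigitRun_stop l (k + 3) with h' | ⟨_, h'⟩
              · omega
              · exact h'
            · -- no digit after the sign: both reject
              have hd2' : PySem.Chars.isdigit l[k + 2] = false := by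
                simpa using hd2
              rw [pvDigitRun_of_not_digit l (k + 2) h2 hd2', if_pos rfl,
                List.drop_eq_getElem_cons h2, pvAccept_cons]
              have : AutoNumR_step "q5" l[k + 2] = "M" := by simp [AutoNumR_step, hd2']
              rw [this, pvAccept_M]
          · -- string ends after the sign: both reject
            have h2' : l.length ≤ k + 2 := by omega
            rw [pvDigitRun_of_ge l (k + 2) h2', if_pos rfl, List.drop_eq_nil_of_le (by omega), pvAccept_q5_nil]
        · -- no sign after the e
          have hk2 : pvSkipSign l (k + 1) = k + 1 := pvSkipSign_of_not_sign l (k + 1) h1 hs2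
          rw [hk2]
          by_cases hd1 : PySem.Chars.isdigit l[k + 1] = true
          · -- a digit: A moves q4 → q3 and runs the digits; B recurses at j
            have hstep2 : AutoNumR_step "q4" l[k + 1] = "q3" := by simp [AutoNumR_step, hd1]
            have hj : pvDigitRun l (k + 1) = pvDigitRun l (k + 2) :=
              pvDigitRun_succ_of_digit l (k + 1) h1 hd1
            have hge : k + 2 ≤ pvDigitRun l (k + 2) := pvDigitRun_ge l (k + 2)
            have hle : pvDigitRun l (k + 2) ≤ l.length := pvDigitRun_le l (k + 2) (by omega)
            rw [if_neg (by omega), List.drop_eq_getElem_cons h1, pvAccept_cons, hstep2, hj,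
              pvAccept_run "q3" (Or.inr rfl) l (k + 2)]
            refine ih (l.length - pvDigitRun l (k + 2)) (by omega) _ rfl hle ?_
            intro h
            rcases pvDigitRun_stop l (k + 2) with h' | ⟨_, h'⟩
            · omega
            · exact h'
          · -- neither digit nor sign after the e: both reject
            have hd1' : PySem.Chars.isdigit l[k + 1] = false := by simpa using hd1
            push Not at hs2
            rw [pvDigitRun_of_not_digit l (k + 1) h1 hd1', if_pos rfl,
              List.drop_eq_getElem_cons h1, pvAccept_cons]
            have : AutoNumR_step "q4" l[k + 1] = "M" := by
              simp [AutoNumR_step, hd1', hs2.1, hs2.2]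
            rw [this, pvAccept_M]
      · -- string ends right after the e: both reject
        have h1' : l.length ≤ k + 1 := by omega
        rw [pvSkipSign_of_ge l (k + 1) h1', pvDigitRun_of_ge l (k + 1) h1', if_pos rfl,
          List.drop_eq_nil_of_le (by omega), pvAccept_q4_nil]
    · -- head is not an exponent marker: both reject
      rw [pvExpLoop_of_not_e l k hlt he, List.drop_eq_getElem_cons hlt, pvAccept_cons]
      push Not at he
      have : AutoNumR_step "q3" l[k] = "M" := by simp [AutoNumR_step, hd, he.1, he.2]
      rw [this, pvAccept_M]
  · -- position at the end of the string: both accept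
    have hkl : k = l.length := by omega
    rw [pvExpLoop_of_ge l k (by omega), List.drop_eq_nil_of_le (by omega)]
    decide

-- q1 and q3 accept the same suffixes when the head is neither a digit nor '.'
theorem pvAccept_q1_eq_q3 (l : List Char) (k : Nat)
    (hstop : k = l.length ∨ ∃ h : k < l.length,
      PySem.Chars.isdigit l[k] = false ∧ l[k] ≠ '.') :
    pvAccept "q1" (l.drop k) = pvAccept "q3" (l.drop k) := by
  rcases hstop with rfl | ⟨hlt, hd, hdot⟩
  · simp [pvAccept]
  · rw [List.drop_eq_getElem_cons hlt]
    by_cases he : l[k] = 'e' ∨ l[k] = 'E'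
    · have h1 : AutoNumR_step "q1" l[k] = "q4" := by rcases he with h | h <;> rw [h] <;> decide
      have h3 : AutoNumR_step "q3" l[k] = "q4" := by rcases he with h | h <;> rw [h] <;> decide
      simp only [pvAccept, List.foldl_cons, h1, h3]
    · push Not at he
      have h1 : AutoNumR_step "q1" l[k] = "M" := by
        simp [AutoNumR_step, hd, hdot, he.1, he.2]
      have h3 : AutoNumR_step "q3" l[k] = "M" := by
        simp [AutoNumR_step, hd, he.1, he.2]
      simp only [pvAccept, List.foldl_cons, h1, h3]

theorem AutoNumR_eq_pvAccept (w : String) : AutoNumR w = pvAccept "q0" w.toList := by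
  cases h : (List.foldl AutoNumR_step "q0" w.toList == "q1"
      || List.foldl AutoNumR_step "q0" w.toList == "q3") <;>
    simp [AutoNumR, pvAccept, h]

-- ===== VERDICT (by name: the statement is the Claim_ definition above) =====
theorem AutoNumR_spec : Claim_equal_AutoNumR := by
  intro w _
  unfold Spec_AutoNumR AutoNumR_alt
  rw [AutoNumR_eq_pvAccept]
  set l := w.toList with hl
  clear hl
  by_cases h0 : 0 < l.length
  · rw [dif_pos h0]
    by_cases hc0 : PySem.Chars.isdigit l[0] ∨ l[0] = '+' ∨ l[0] = '-'
    · rw [if_neg (not_not_intro hc0)]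
      -- A: q0 → q1 on the first character, then the digit run keeps q1
      have hstep0 : AutoNumR_step "q0" l[0] = "q1" := by
        rcases hc0 with h | h | h
        · simp [AutoNumR_step, h]
        · rw [h]; decide
        · rw [h]; decide
      have hL : l = l[0] :: l.drop 1 := by
        have h := List.drop_eq_getElem_cons h0
        rwa [List.drop_zero] at h
      have hA : pvAccept "q0" l = pvAccept "q1" (l.drop (pvDigitRun l 1)) := by
        conv_lhs => rw [hL]
        rw [pvAccept_cons, hstep0, pvAccept_run "q1" (Or.inl rfl) l 1]
      rw [hA]
      have hge1 : 1 ≤ pvDigitRun l 1 := pvDigitRun_ge l 1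
      have hle1 : pvDigitRun l 1 ≤ l.length := pvDigitRun_le l 1 (by omega)
      by_cases hk : pvDigitRun l 1 < l.length
      · rw [dif_pos hk]
        have hdk : PySem.Chars.isdigit l[pvDigitRun l 1] = false := by
          rcases pvDigitRun_stop l 1 with h' | ⟨_, h'⟩
          · omega
          · exact h'
        by_cases hdot : l[pvDigitRun l 1] = '.'
        · rw [if_pos hdot]
          -- A: q1 → q2 on the dot
          have hstep1 : AutoNumR_step "q1" l[pvDigitRun l 1] = "q2" := by rw [hdot]; decide
          rw [List.drop_eq_getElem_cons hk, pvAccept_cons, hstep1]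
          by_cases h1 : pvDigitRun l 1 + 1 < l.length
          · by_cases hd1 : PySem.Chars.isdigit l[pvDigitRun l 1 + 1] = true
            · -- a fraction digit: A moves q2 → q3 and runs the digits; B enters the e-loop at j
              have hstep2 : AutoNumR_step "q2" l[pvDigitRun l 1 + 1] = "q3" := by
                simp [AutoNumR_step, hd1]
              have hj : pvDigitRun l (pvDigitRun l 1 + 1) = pvDigitRun l (pvDigitRun l 1 + 2) :=
                pvDigitRun_succ_of_digit l (pvDigitRun l 1 + 1) h1 hd1
              have hge : pvDigitRun l 1 + 2 ≤ pvDigitRun l (pvDigitRun l 1 + 2) :=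
                pvDigitRun_ge l (pvDigitRun l 1 + 2)
              have hle : pvDigitRun l (pvDigitRun l 1 + 2) ≤ l.length :=
                pvDigitRun_le l (pvDigitRun l 1 + 2) (by omega)
              rw [if_neg (by omega), List.drop_eq_getElem_cons h1, pvAccept_cons, hstep2, hj,
                pvAccept_run "q3" (Or.inr rfl) l (pvDigitRun l 1 + 2)]
              refine (pvExpLoop_eq_accept_q3 l _ _ rfl hle ?_).symm
              intro h
              rcases pvDigitRun_stop l (pvDigitRun l 1 + 2) with h' | ⟨_, h'⟩
              · omega
              · exact h'
            · -- no digit after the dot: both reject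
              have hd1' : PySem.Chars.isdigit l[pvDigitRun l 1 + 1] = false := by simpa using hd1
              rw [pvDigitRun_of_not_digit l (pvDigitRun l 1 + 1) h1 hd1', if_pos rfl,
                List.drop_eq_getElem_cons h1, pvAccept_cons]
              have : AutoNumR_step "q2" l[pvDigitRun l 1 + 1] = "M" := by
                simp [AutoNumR_step, hd1']
              rw [this, pvAccept_M]
          · -- string ends right after the dot: both reject
            rw [pvDigitRun_of_ge l (pvDigitRun l 1 + 1) (by omega), if_pos rfl,
              List.drop_eq_nil_of_le (by omega), pvAccept_q2_nil]
        · -- no dot at the stop position: q1 and q3 agree, then the e-loop lemma applies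
          rw [if_neg hdot, pvAccept_q1_eq_q3 l (pvDigitRun l 1) (Or.inr ⟨hk, hdk, hdot⟩)]
          exact (pvExpLoop_eq_accept_q3 l _ _ rfl hle1 fun h => hdk).symm
      · -- the whole word is a signed digit run: both accept
        rw [dif_neg hk, pvExpLoop_of_ge l _ (by omega), List.drop_eq_nil_of_le (by omega)]
        decide
    · -- bad first character: both reject
      rw [if_pos hc0]
      have hL : l = l[0] :: l.drop 1 := by
        have h := List.drop_eq_getElem_cons h0
        rwa [List.drop_zero] at h
      conv_lhs => rw [hL]
      rw [pvAccept_cons]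
      push Not at hc0
      have : AutoNumR_step "q0" l[0] = "M" := by
        simp [AutoNumR_step, hc0.1, hc0.2.1, hc0.2.2]
      rw [this, pvAccept_M]
  · -- empty word: both reject
    rw [dif_neg h0]
    have hnil : l = [] := List.length_eq_zero_iff.mp (by omega)
    rw [hnil]
    decide
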